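-- pv_equiv track=rewrite | github.com/mikeoborotov/mipt-bioinformatics | problem-20/problem_20.py | cyclospectrum
-- ===== SOURCE A (Python) =====
-- def cyclospectrum(peptide):
--     prefix_mass = [0]
--
--     for i in range(len(peptide)):
--         prefix_mass.append(prefix_mass[i]+peptide[i])
--
--     theoretical_spectrum = [0]
--
--     for i in range(len(prefix_mass) - 1):
--         for j in range(i + 1, len(prefix_mass)):
--             theoretical_spectrum.append(prefix_mass[j]-prefix_mass[i])
--             if i > 0 and j < len(prefix_mass)-1:
--                 theoretical_spectrum.append(prefix_mass[-1] - (prefix_mass[j] - prefix_mass[i]))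
--
--     return sorted(theoretical_spectrum)
-- ===== SOURCE B (Python) =====
-- def cyclospectrum(peptide):
--     n = len(peptide)
--     total = sum(peptide)
--     if n == 0:
--         return [0]
--     prefix = [0]
--     for m in peptide + peptide:
--         prefix.append(prefix[-1] + m)
--     spectrum = [0, total]
--     for length in range(1, n):
--         for start in range(n):
--             spectrum.append(prefix[start + length] - prefix[start])
--     return sorted(spectrum)
-- ===== Notes on version B (the rewrite author's own statement) =====
-- stated objective: alternative
-- what changed: B enumerates cyclic subpeptides by (length, start) over prefix sums of the doubled peptide, so wraparound windows are plain contiguous windows; A enumerates (i,j) index pairs of a linear prefix-sum array and adds wraparound masses via a 'total minus interior window' complement branch.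
import Mathlib
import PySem

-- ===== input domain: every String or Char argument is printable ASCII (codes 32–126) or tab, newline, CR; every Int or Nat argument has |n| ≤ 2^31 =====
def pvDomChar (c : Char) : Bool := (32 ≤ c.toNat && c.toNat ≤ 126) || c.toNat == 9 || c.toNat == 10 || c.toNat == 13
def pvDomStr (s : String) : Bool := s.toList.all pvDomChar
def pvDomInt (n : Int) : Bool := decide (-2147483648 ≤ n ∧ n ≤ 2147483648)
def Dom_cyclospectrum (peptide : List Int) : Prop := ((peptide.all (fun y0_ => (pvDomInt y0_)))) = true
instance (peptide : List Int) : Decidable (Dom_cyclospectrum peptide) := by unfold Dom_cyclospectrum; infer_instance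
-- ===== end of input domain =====

-- B enumerates cyclic subpeptides by (length, start) over prefix sums of the doubled peptide,
-- instead of A's (i,j) pair loop with a 'total minus interior window' complement branch
-- (objective: alternative decomposition; same sorted spectrum).

-- ===== PORT A =====
-- prefix_mass = [0]; for i in range(len(peptide)): prefix_mass.append(prefix_mass[i] + peptide[i])
def pvPrefixMassA (peptide : List Int) : List Int :=
  (PySem.List.pyRange 0 (PySem.List.len peptide) 1).foldl
    (fun pm i => pm ++ [PySem.List.pyGetD pm i 0 + PySem.List.pyGetD peptide i 0]) [0]

-- theoretical_spectrum = [0]; the double loop over (i, j) with the complement branch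
def pvSpectrumA (peptide : List Int) : List Int :=
  (PySem.List.pyRange 0 (PySem.List.len (pvPrefixMassA peptide) - 1) 1).foldl
    (fun acc i =>
      (PySem.List.pyRange (i + 1) (PySem.List.len (pvPrefixMassA peptide)) 1).foldl
        (fun acc j =>
          if 0 < i ∧ j < PySem.List.len (pvPrefixMassA peptide) - 1 then
            (acc ++ [PySem.List.pyGetD (pvPrefixMassA peptide) j 0
              - PySem.List.pyGetD (pvPrefixMassA peptide) i 0])
              ++ [PySem.List.pyGetD (pvPrefixMassA peptide) (-1) 0 -
                (PySem.List.pyGetD (pvPrefixMassA peptide) j 0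
                  - PySem.List.pyGetD (pvPrefixMassA peptide) i 0)]
          else acc ++ [PySem.List.pyGetD (pvPrefixMassA peptide) j 0
            - PySem.List.pyGetD (pvPrefixMassA peptide) i 0])
        acc)
    [0]

def cyclospectrum (peptide : List Int) : List Int :=
  PySem.List.sorted (pvSpectrumA peptide) (fun x => x) false

-- ===== PORT B =====
-- prefix = [0]; for m in peptide + peptide: prefix.append(prefix[-1] + m)
def pvPrefixB (peptide : List Int) : List Int :=
  (peptide ++ peptide).foldl (fun pr m => pr ++ [PySem.List.pyGetD pr (-1) 0 + m]) [0]

-- spectrum = [0, total]; for length in range(1, n): for start in range(n): append a window mass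
def pvSpectrumB (peptide : List Int) : List Int :=
  (PySem.List.pyRange 1 (PySem.List.len peptide) 1).foldl
    (fun acc length =>
      (PySem.List.pyRange 0 (PySem.List.len peptide) 1).foldl
        (fun acc start =>
          acc ++ [PySem.List.pyGetD (pvPrefixB peptide) (start + length) 0
            - PySem.List.pyGetD (pvPrefixB peptide) start 0])
        acc)
    [0, peptide.sum]

def cyclospectrum_alt (peptide : List Int) : List Int :=
  if PySem.List.len peptide = 0 then [0]
  else PySem.List.sorted (pvSpectrumB peptide) (fun x => x) false

-- ===== PRECONDITION & SPEC =====
def Spec_cyclospectrum (peptide : List Int) (out : List Int) : Prop := out = cyclospectrum_alt peptide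
instance (peptide : List Int) (out : List Int) : Decidable (Spec_cyclospectrum peptide out) := by unfold Spec_cyclospectrum; infer_instance

-- ===== CLAIM (what is proved, stated in full; the proofs are below) =====
def Claim_equal_cyclospectrum : Prop := ∀ (peptide : List Int), Dom_cyclospectrum peptide → Spec_cyclospectrum peptide (cyclospectrum peptide)

-- ===== LEMMAS AND PROOFS =====

-- pvP xs i = mass of the first i residues (partial sum)
def pvP (xs : List Int) (i : Int) : Int := (xs.take i.toNat).sum

-- index pair lists and the value functions used to describe both spectra
def pvPairsA (n : Int) : List (Int × Int) :=
  (PySem.List.pyRange 0 n 1).flatMap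
    (fun i => (PySem.List.pyRange (i + 1) (n + 1) 1).map (fun j => (i, j)))

def pvPairsB (n : Int) : List (Int × Int) :=
  (PySem.List.pyRange 1 n 1).flatMap
    (fun L => (PySem.List.pyRange 0 n 1).map (fun s => (L, s)))

def pvVA (xs : List Int) (p : Int × Int) : Int := pvP xs p.2 - pvP xs p.1
def pvCA (xs : List Int) (p : Int × Int) : Int := xs.sum - (pvP xs p.2 - pvP xs p.1)
def pvWB (xs : List Int) (p : Int × Int) : Int :=
  pvP (xs ++ xs) (p.2 + p.1) - pvP (xs ++ xs) p.2

def pvInterior (n : Int) (p : Int × Int) : Bool := decide (0 < p.1 ∧ p.2 < n)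
def pvContig (n : Int) (p : Int × Int) : Bool := decide (p.2 + p.1 ≤ n)
def pvProper (n : Int) (p : Int × Int) : Bool := decide (p.2 - p.1 < n)

-- ---- generic list lemmas ----

theorem pv_flatMap_congr {α β : Type} (l : List α) (f g : α → List β)
    (h : ∀ a ∈ l, f a = g a) : l.flatMap f = l.flatMap g := by
  simp only [List.flatMap]
  rw [List.map_congr_left h]

theorem pv_perm_flatMap {α β : Type} (l : List α) (f g : α → List β)
    (h : ∀ a ∈ l, (f a).Perm (g a)) : (l.flatMap f).Perm (l.flatMap g) := by
  induction l with
  | nil => simp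
  | cons a t ih =>
    simp only [List.flatMap_cons]
    exact (h a (by simp)).append (ih (fun x hx => h x (by simp [hx])))

theorem pv_perm_flatMap_append {α β : Type} (l : List α) (f g : α → List β) :
    (l.flatMap fun x => f x ++ g x).Perm (l.flatMap f ++ l.flatMap g) := by
  induction l with
  | nil => simp
  | cons a t ih =>
    simp only [List.flatMap_cons]
    refine (List.Perm.append_left _ ih).trans ?_
    have h := List.Perm.append_left (f a)
      ((List.perm_append_comm_assoc (g a) (t.flatMap f) (t.flatMap g)))
    simpa [List.append_assoc] using h

theorem pv_filter_flatMap {α β : Type} (l : List α) (f : α → List β) (p : β → Bool) :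
    (l.flatMap f).filter p = l.flatMap fun a => (f a).filter p := by
  induction l with
  | nil => simp
  | cons a t ih => simp [List.filter_append, ih]

theorem pv_nodup_pairs (l : List Int) (f : Int → List Int) (hl : l.Nodup)
    (hf : ∀ i, (f i).Nodup) :
    (l.flatMap fun i => (f i).map (fun j => (i, j))).Nodup := by
  induction l with
  | nil => simp
  | cons a t ih =>
    simp only [List.flatMap_cons]
    have ha : a ∉ t := (List.nodup_cons.mp hl).1
    have ht : t.Nodup := (List.nodup_cons.mp hl).2
    refine List.Nodup.append ?_ (ih ht) ?_
    · exact (hf a).map (fun x y hxy => by simpa using congrArg Prod.snd hxy)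
    · intro x hx1 hx2
      simp only [List.mem_map] at hx1
      obtain ⟨j, _, rfl⟩ := hx1
      simp only [List.mem_flatMap, List.mem_map] at hx2
      obtain ⟨i, hi, j', _, hj'⟩ := hx2
      have : i = a := by
        have := congrArg Prod.fst hj'
        simpa using this
      exact ha (this ▸ hi)

theorem pv_flatMap_map_pairs {β : Type} (l : List Int) (f : Int → List Int)
    (F : Int → Int → β) :
    (l.flatMap fun i => (f i).map (F i))
      = ((l.flatMap fun i => (f i).map (fun j => (i, j))).map (fun p => F p.1 p.2)) := by
  simp only [List.map_flatMap, List.map_map]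
  rfl

-- ---- prefix-sum characterisations ----

theorem pvP_cons (m : Int) (t : List Int) (i : Int) (h : 0 ≤ i) :
    pvP (m :: t) (i + 1) = m + pvP t i := by
  unfold pvP
  have h1 : (i + 1).toNat = i.toNat + 1 := by omega
  rw [h1, List.take_succ_cons, List.sum_cons]

theorem pv_getD_map_range' (F : ℕ → Int) (m : ℕ) (i : Int) (h0 : 0 ≤ i) (h1 : i < (m : Int)) :
    PySem.List.pyGetD ((List.range m).map F) i 0 = F i.toNat := by
  rw [PySem.List.pyGetD_eq_getElem _ 0 h0 (by simpa using h1)]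
  have : i.toNat < m := by omega
  simp [this]

theorem pv_prefixA_aux (xs : List Int) (k : ℕ) (hk : k ≤ xs.length) :
    (PySem.List.pyRange 0 (k : Int) 1).foldl
      (fun pm i => pm ++ [PySem.List.pyGetD pm i 0 + PySem.List.pyGetD xs i 0]) [0]
      = (List.range (k + 1)).map (fun t : ℕ => pvP xs (t : Int)) := by
  induction k with
  | zero => simp [PySem.List.pyRange_one_eq_nil, pvP]
  | succ k ih =>
    have hsplit : PySem.List.pyRange 0 ((k + 1 : ℕ) : Int) 1
        = PySem.List.pyRange 0 (k : Int) 1 ++ [(k : Int)] := by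
      push_cast
      exact PySem.List.pyRange_one_succ_right (by omega)
    rw [hsplit, List.foldl_append, ih (by omega)]
    simp only [List.foldl_cons, List.foldl_nil]
    rw [pv_getD_map_range' _ _ _ (by omega) (by push_cast; omega)]
    rw [PySem.List.pyGetD_eq_getElem xs 0 (by omega) (by push_cast; omega)]
    rw [List.range_succ (n := k + 1), List.map_append]
    congr 1
    simp only [List.map_cons, List.map_nil, List.cons.injEq, and_true, Int.toNat_natCast]
    unfold pvP
    simp only [Int.toNat_natCast]
    rw [List.sum_take_succ xs k (by omega)]

theorem pv_prefixA (xs : List Int) :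
    pvPrefixMassA xs = (List.range (xs.length + 1)).map (fun t : ℕ => pvP xs (t : Int)) := by
  unfold pvPrefixMassA
  rw [PySem.List.len_eq]
  exact pv_prefixA_aux xs xs.length le_rfl

theorem pv_prefixB_aux (ys : List Int) : ∀ (acc : List Int) (s : Int),
    acc.getLast? = some s →
    ys.foldl (fun pr m => pr ++ [PySem.List.pyGetD pr (-1) 0 + m]) acc
      = acc ++ (List.range ys.length).map (fun t : ℕ => s + pvP ys ((t : Int) + 1)) := by
  induction ys with
  | nil => intro acc s _; simp
  | cons m t ih =>
    intro acc s h
    have hne : acc ≠ [] := by rintro rfl; simp at h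
    have hlast : PySem.List.pyGetD acc (-1) 0 = s := by
      rw [PySem.List.pyGetD_neg_one acc 0 hne]
      have h2 := List.getLast?_eq_some_getLast hne
      rw [h2] at h
      exact Option.some.inj h
    simp only [List.foldl_cons]
    rw [hlast, ih (acc ++ [s + m]) (s + m) (by rw [List.getLast?_concat])]
    rw [List.append_assoc]
    congr 1
    rw [List.length_cons, List.range_succ_eq_map, List.map_cons, List.map_map,
      List.singleton_append]
    congr 1
    · have hm : pvP (m :: t) ((↑(0 : ℕ) : Int) + 1) = m := by simp [pvP]
      rw [hm]
    · apply List.map_congr_left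
      intro a _
      simp only [Function.comp_apply, Nat.succ_eq_add_one]
      have hc : ((↑(a + 1) : Int)) + 1 = ((a : Int) + 1) + 1 := by push_cast; ring
      rw [hc, pvP_cons m t ((a : Int) + 1) (by omega)]
      ring

theorem pv_prefixB (xs : List Int) :
    pvPrefixB xs
      = (List.range ((xs ++ xs).length + 1)).map (fun t : ℕ => pvP (xs ++ xs) (t : Int)) := by
  unfold pvPrefixB
  rw [pv_prefixB_aux (xs ++ xs) [0] 0 rfl]
  rw [List.range_succ_eq_map, List.map_cons, List.map_map, List.singleton_append]
  congr 1
  apply List.map_congr_left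
  intro a _
  simp only [Function.comp_apply, Nat.succ_eq_add_one]
  push_cast
  ring_nf

theorem pv_getD_map_range_last (F : ℕ → Int) (m : ℕ) :
    PySem.List.pyGetD ((List.range (m + 1)).map F) (-1) 0 = F m := by
  rw [List.range_succ, List.map_append]
  simpa using PySem.List.pyGetD_neg_one_append_singleton ((List.range m).map F) (F m) 0

-- ---- pvP facts ----

theorem pvP_zero (xs : List Int) : pvP xs 0 = 0 := by simp [pvP]

theorem pvP_len (xs : List Int) : pvP xs (xs.length : Int) = xs.sum := by
  simp [pvP]

theorem pvP_ext_low (xs : List Int) (k : Int) (hk : k ≤ (xs.length : Int)) :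
    pvP (xs ++ xs) k = pvP xs k := by
  unfold pvP
  rw [List.take_append_of_le_length (by omega)]

theorem pvP_ext_high (xs : List Int) (k : Int) (h1 : (xs.length : Int) ≤ k) :
    pvP (xs ++ xs) k = xs.sum + pvP xs (k - xs.length) := by
  unfold pvP
  rw [List.take_append]
  rw [List.take_of_length_le (by omega), List.sum_append]
  have h2 : (k - (xs.length : Int)).toNat = k.toNat - xs.length := by omega
  rw [h2]

-- ---- spectra as maps over pair lists ----

-- ---- membership / nodup of the pair lists ----

theorem pv_mem_pairsA (n : Int) (p : Int × Int) :
    p ∈ pvPairsA n ↔ 0 ≤ p.1 ∧ p.1 < p.2 ∧ p.2 ≤ n := by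
  obtain ⟨i, j⟩ := p
  simp only [pvPairsA, List.mem_flatMap, List.mem_map, PySem.List.mem_pyRange_one,
    Prod.mk.injEq]
  constructor
  · rintro ⟨i', hi', j', hj', rfl, rfl⟩; exact ⟨by omega, by omega, by omega⟩
  · rintro ⟨h1, h2, h3⟩; exact ⟨i, ⟨by omega, by omega⟩, j, ⟨by omega, by omega⟩, rfl, rfl⟩

theorem pv_mem_pairsB (n : Int) (p : Int × Int) :
    p ∈ pvPairsB n ↔ 1 ≤ p.1 ∧ p.1 < n ∧ 0 ≤ p.2 ∧ p.2 < n := by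
  obtain ⟨L, s⟩ := p
  simp only [pvPairsB, List.mem_flatMap, List.mem_map, PySem.List.mem_pyRange_one,
    Prod.mk.injEq]
  constructor
  · rintro ⟨L', hL', s', hs', rfl, rfl⟩; exact ⟨by omega, by omega, by omega, by omega⟩
  · rintro ⟨h1, h2, h3, h4⟩; exact ⟨L, ⟨by omega, by omega⟩, s, ⟨by omega, by omega⟩, rfl, rfl⟩

theorem pv_nodup_pairsA (n : Int) : (pvPairsA n).Nodup :=
  pv_nodup_pairs _ _ (PySem.List.nodup_pyRange_one _ _) (fun _ => PySem.List.nodup_pyRange_one _ _)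

theorem pv_nodup_pairsB (n : Int) : (pvPairsB n).Nodup :=
  pv_nodup_pairs _ _ (PySem.List.nodup_pyRange_one _ _) (fun _ => PySem.List.nodup_pyRange_one _ _)

theorem pv_getD_P (ys : List Int) (i : Int) (h0 : 0 ≤ i) (h1 : i < (ys.length : Int) + 1) :
    PySem.List.pyGetD ((List.range (ys.length + 1)).map (fun t : ℕ => pvP ys (t : Int))) i 0
      = pvP ys i := by
  rw [pv_getD_map_range' _ _ _ h0 (by push_cast; omega)]
  congr 1
  omega

theorem pv_specB (xs : List Int) :
    pvSpectrumB xs = 0 :: xs.sum :: (pvPairsB xs.length).map (pvWB xs) := by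
  have e1 : pvSpectrumB xs
      = [0, xs.sum] ++ (pvPairsB xs.length).map (fun p =>
          PySem.List.pyGetD (pvPrefixB xs) (p.2 + p.1) 0
            - PySem.List.pyGetD (pvPrefixB xs) p.2 0) := by
    unfold pvSpectrumB
    have hb : (fun (acc : List Int) (L : Int) =>
        (PySem.List.pyRange 0 (PySem.List.len xs) 1).foldl
          (fun acc start => acc ++ [PySem.List.pyGetD (pvPrefixB xs) (start + L) 0
            - PySem.List.pyGetD (pvPrefixB xs) start 0]) acc)
        = (fun (acc : List Int) (L : Int) => acc ++ (PySem.List.pyRange 0 (PySem.List.len xs) 1).map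
            (fun start => PySem.List.pyGetD (pvPrefixB xs) (start + L) 0
              - PySem.List.pyGetD (pvPrefixB xs) start 0)) := by
      funext acc L
      exact PySem.List.foldl_append_singleton_eq_map _ _ _
    rw [hb, PySem.List.foldl_append_eq_flatMap]
    rw [pv_flatMap_map_pairs (PySem.List.pyRange 1 (PySem.List.len xs) 1)
      (fun _ => PySem.List.pyRange 0 (PySem.List.len xs) 1)
      (fun L s => PySem.List.pyGetD (pvPrefixB xs) (s + L) 0
        - PySem.List.pyGetD (pvPrefixB xs) s 0)]
    rw [PySem.List.len_eq]
    rfl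
  rw [e1]
  show (0 : Int) :: xs.sum :: _ = _
  congr 1
  congr 1
  apply List.map_congr_left
  rintro ⟨L, s⟩ hp
  rw [pv_mem_pairsB] at hp
  obtain ⟨h1, h2, h3, h4⟩ := hp
  have hL : ((xs ++ xs).length : Int) = (xs.length : Int) + xs.length := by
    simp
  simp only at h1 h2 h3 h4
  unfold pvWB
  rw [pv_prefixB]
  rw [pv_getD_P _ _ (by omega) (by omega)]
  rw [pv_getD_P _ _ (by omega) (by omega)]


-- ---- spectrum A ----

def pvM (xs : List Int) : List Int :=
  (List.range (xs.length + 1)).map (fun t : ℕ => pvP xs (t : Int))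

theorem pv_prefixA_M (xs : List Int) : pvPrefixMassA xs = pvM xs := pv_prefixA xs

theorem pv_flatMap_one {α β : Type} (l : List α) (f : α → β) :
    (l.flatMap fun x => [f x]) = l.map f := by
  induction l <;> simp_all

theorem pv_flatMap_ite_prop {α β : Type} (l : List α) (p : α → Prop) [DecidablePred p]
    (f : α → β) :
    (l.flatMap fun x => if p x then [f x] else []) = (l.filter (fun x => decide (p x))).map f := by
  induction l with
  | nil => simp
  | cons a t ih => by_cases h : p a <;> simp [h, ih, List.filter_cons]

theorem pv_flatMap_filter_pairs {β : Type} (l : List Int) (f : Int → List Int)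
    (q : Int × Int → Bool) (F : Int → Int → β) :
    (l.flatMap fun i => ((f i).filter (fun j => q (i, j))).map (F i))
      = ((l.flatMap fun i => (f i).map (fun j => (i, j))).filter q).map (fun p => F p.1 p.2) := by
  rw [pv_filter_flatMap, List.map_flatMap]
  apply pv_flatMap_congr
  intro i _
  rw [List.filter_map, List.map_map]
  rfl

theorem pv_getD_M (xs : List Int) (i : Int) (h0 : 0 ≤ i) (h1 : i < (xs.length : Int) + 1) :
    PySem.List.pyGetD (pvM xs) i 0 = pvP xs i := pv_getD_P xs i h0 h1

theorem pv_getD_M_last (xs : List Int) :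
    PySem.List.pyGetD (pvM xs) (-1) 0 = xs.sum := by
  unfold pvM
  rw [pv_getD_map_range_last]
  exact pvP_len xs

theorem pv_specA (xs : List Int) :
    (pvSpectrumA xs).Perm
      (0 :: ((pvPairsA xs.length).map (pvVA xs)
        ++ ((pvPairsA xs.length).filter (pvInterior xs.length)).map (pvCA xs))) := by
  have e1 : pvSpectrumA xs
      = [0] ++ (PySem.List.pyRange 0 (xs.length : Int) 1).flatMap (fun i =>
          (PySem.List.pyRange (i + 1) ((xs.length : Int) + 1) 1).flatMap (fun j =>
            if 0 < i ∧ j < (xs.length : Int) then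
              [PySem.List.pyGetD (pvM xs) j 0 - PySem.List.pyGetD (pvM xs) i 0,
               PySem.List.pyGetD (pvM xs) (-1) 0 -
                 (PySem.List.pyGetD (pvM xs) j 0 - PySem.List.pyGetD (pvM xs) i 0)]
            else [PySem.List.pyGetD (pvM xs) j 0 - PySem.List.pyGetD (pvM xs) i 0])) := by
    unfold pvSpectrumA
    simp only [pv_prefixA_M]
    have hlen : PySem.List.len (pvM xs) = (xs.length : Int) + 1 := by
      simp [pvM, PySem.List.len_eq]
    simp only [hlen, add_sub_cancel_right]
    have hin : (fun (acc : List Int) (i : Int) =>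
        (PySem.List.pyRange (i + 1) ((xs.length : Int) + 1) 1).foldl
          (fun acc j =>
            if 0 < i ∧ j < (xs.length : Int) then
              (acc ++ [PySem.List.pyGetD (pvM xs) j 0 - PySem.List.pyGetD (pvM xs) i 0])
                ++ [PySem.List.pyGetD (pvM xs) (-1) 0 -
                  (PySem.List.pyGetD (pvM xs) j 0 - PySem.List.pyGetD (pvM xs) i 0)]
            else acc ++ [PySem.List.pyGetD (pvM xs) j 0 - PySem.List.pyGetD (pvM xs) i 0])
          acc)
        = (fun (acc : List Int) (i : Int) => acc ++
            (PySem.List.pyRange (i + 1) ((xs.length : Int) + 1) 1).flatMap (fun j =>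
              if 0 < i ∧ j < (xs.length : Int) then
                [PySem.List.pyGetD (pvM xs) j 0 - PySem.List.pyGetD (pvM xs) i 0,
                 PySem.List.pyGetD (pvM xs) (-1) 0 -
                   (PySem.List.pyGetD (pvM xs) j 0 - PySem.List.pyGetD (pvM xs) i 0)]
              else [PySem.List.pyGetD (pvM xs) j 0 - PySem.List.pyGetD (pvM xs) i 0])) := by
      funext acc i
      have hb : (fun (acc : List Int) (j : Int) =>
          if 0 < i ∧ j < (xs.length : Int) then
            (acc ++ [PySem.List.pyGetD (pvM xs) j 0 - PySem.List.pyGetD (pvM xs) i 0])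
              ++ [PySem.List.pyGetD (pvM xs) (-1) 0 -
                (PySem.List.pyGetD (pvM xs) j 0 - PySem.List.pyGetD (pvM xs) i 0)]
          else acc ++ [PySem.List.pyGetD (pvM xs) j 0 - PySem.List.pyGetD (pvM xs) i 0])
          = (fun (acc : List Int) (j : Int) => acc ++
              (if 0 < i ∧ j < (xs.length : Int) then
                [PySem.List.pyGetD (pvM xs) j 0 - PySem.List.pyGetD (pvM xs) i 0,
                 PySem.List.pyGetD (pvM xs) (-1) 0 -
                   (PySem.List.pyGetD (pvM xs) j 0 - PySem.List.pyGetD (pvM xs) i 0)]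
              else [PySem.List.pyGetD (pvM xs) j 0 - PySem.List.pyGetD (pvM xs) i 0])) := by
        funext acc j
        by_cases h : 0 < i ∧ j < (xs.length : Int) <;> simp [h]
      rw [hb, PySem.List.foldl_append_eq_flatMap]
    rw [hin, PySem.List.foldl_append_eq_flatMap]
  rw [e1, List.singleton_append]
  refine List.Perm.cons 0 ?_
  -- split each inner element list into the direct part and the complement part
  have e2 : (PySem.List.pyRange 0 (xs.length : Int) 1).flatMap (fun i =>
        (PySem.List.pyRange (i + 1) ((xs.length : Int) + 1) 1).flatMap (fun j =>
          if 0 < i ∧ j < (xs.length : Int) then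
            [PySem.List.pyGetD (pvM xs) j 0 - PySem.List.pyGetD (pvM xs) i 0,
             PySem.List.pyGetD (pvM xs) (-1) 0 -
               (PySem.List.pyGetD (pvM xs) j 0 - PySem.List.pyGetD (pvM xs) i 0)]
          else [PySem.List.pyGetD (pvM xs) j 0 - PySem.List.pyGetD (pvM xs) i 0]))
      = (PySem.List.pyRange 0 (xs.length : Int) 1).flatMap (fun i =>
          (PySem.List.pyRange (i + 1) ((xs.length : Int) + 1) 1).flatMap (fun j =>
            [PySem.List.pyGetD (pvM xs) j 0 - PySem.List.pyGetD (pvM xs) i 0]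
            ++ (if 0 < i ∧ j < (xs.length : Int) then
                [PySem.List.pyGetD (pvM xs) (-1) 0 -
                  (PySem.List.pyGetD (pvM xs) j 0 - PySem.List.pyGetD (pvM xs) i 0)]
              else []))) := by
    apply pv_flatMap_congr
    intro i _
    apply pv_flatMap_congr
    intro j _
    by_cases h : 0 < i ∧ j < (xs.length : Int) <;> simp [h]
  rw [e2]
  -- per outer index: split the flatMap into direct values and complement values
  have hper : ∀ i ∈ PySem.List.pyRange 0 (xs.length : Int) 1,
      ((PySem.List.pyRange (i + 1) ((xs.length : Int) + 1) 1).flatMap (fun j =>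
          [PySem.List.pyGetD (pvM xs) j 0 - PySem.List.pyGetD (pvM xs) i 0]
          ++ (if 0 < i ∧ j < (xs.length : Int) then
              [PySem.List.pyGetD (pvM xs) (-1) 0 -
                (PySem.List.pyGetD (pvM xs) j 0 - PySem.List.pyGetD (pvM xs) i 0)]
            else []))).Perm
      ((PySem.List.pyRange (i + 1) ((xs.length : Int) + 1) 1).map (fun j =>
          PySem.List.pyGetD (pvM xs) j 0 - PySem.List.pyGetD (pvM xs) i 0)
        ++ ((PySem.List.pyRange (i + 1) ((xs.length : Int) + 1) 1).filter
            (fun j => decide (0 < i ∧ j < (xs.length : Int)))).map (fun j =>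
          PySem.List.pyGetD (pvM xs) (-1) 0 -
            (PySem.List.pyGetD (pvM xs) j 0 - PySem.List.pyGetD (pvM xs) i 0))) := by
    intro i _
    refine (pv_perm_flatMap_append _ _ _).trans ?_
    rw [pv_flatMap_one, pv_flatMap_ite_prop]
  refine (pv_perm_flatMap _ _ _ hper).trans ?_
  refine (pv_perm_flatMap_append _ _ _).trans ?_
  have e3 : (PySem.List.pyRange 0 (xs.length : Int) 1).flatMap (fun i =>
        (PySem.List.pyRange (i + 1) ((xs.length : Int) + 1) 1).map (fun j =>
          PySem.List.pyGetD (pvM xs) j 0 - PySem.List.pyGetD (pvM xs) i 0))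
      = (pvPairsA xs.length).map (fun p =>
          PySem.List.pyGetD (pvM xs) p.2 0 - PySem.List.pyGetD (pvM xs) p.1 0) := by
    exact pv_flatMap_map_pairs _ _ _
  have e4 : (PySem.List.pyRange 0 (xs.length : Int) 1).flatMap (fun i =>
        ((PySem.List.pyRange (i + 1) ((xs.length : Int) + 1) 1).filter
          (fun j => decide (0 < i ∧ j < (xs.length : Int)))).map (fun j =>
          PySem.List.pyGetD (pvM xs) (-1) 0 -
            (PySem.List.pyGetD (pvM xs) j 0 - PySem.List.pyGetD (pvM xs) i 0)))
      = ((pvPairsA xs.length).filter (pvInterior xs.length)).map (fun p =>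
          PySem.List.pyGetD (pvM xs) (-1) 0 -
            (PySem.List.pyGetD (pvM xs) p.2 0 - PySem.List.pyGetD (pvM xs) p.1 0)) := by
    unfold pvPairsA pvInterior
    exact pv_flatMap_filter_pairs (PySem.List.pyRange 0 (xs.length : Int) 1)
      (fun i => PySem.List.pyRange (i + 1) ((xs.length : Int) + 1) 1)
      (fun p => decide (0 < p.1 ∧ p.2 < (xs.length : Int)))
      (fun i j => PySem.List.pyGetD (pvM xs) (-1) 0 -
        (PySem.List.pyGetD (pvM xs) j 0 - PySem.List.pyGetD (pvM xs) i 0))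
  rw [e3, e4]
  have e5 : (pvPairsA xs.length).map (fun p =>
        PySem.List.pyGetD (pvM xs) p.2 0 - PySem.List.pyGetD (pvM xs) p.1 0)
      = (pvPairsA xs.length).map (pvVA xs) := by
    apply List.map_congr_left
    intro p hp
    rw [pv_mem_pairsA] at hp
    obtain ⟨h1, h2, h3⟩ := hp
    unfold pvVA
    rw [pv_getD_M _ _ (by omega) (by omega), pv_getD_M _ _ (by omega) (by omega)]
  have e6 : ((pvPairsA xs.length).filter (pvInterior xs.length)).map (fun p =>
        PySem.List.pyGetD (pvM xs) (-1) 0 -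
          (PySem.List.pyGetD (pvM xs) p.2 0 - PySem.List.pyGetD (pvM xs) p.1 0))
      = ((pvPairsA xs.length).filter (pvInterior xs.length)).map (pvCA xs) := by
    apply List.map_congr_left
    intro p hp
    have hp' : p ∈ pvPairsA (xs.length : Int) := (List.mem_filter.mp hp).1
    rw [pv_mem_pairsA] at hp'
    obtain ⟨h1, h2, h3⟩ := hp'
    unfold pvCA
    rw [pv_getD_M_last, pv_getD_M _ _ (by omega) (by omega),
      pv_getD_M _ _ (by omega) (by omega)]
  rw [e5, e6]

-- ---- the core permutation ----

theorem pv_pairs_perm (xs : List Int) (hne : xs ≠ []) :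
    ((pvPairsA xs.length).map (pvVA xs)
      ++ ((pvPairsA xs.length).filter (pvInterior xs.length)).map (pvCA xs)).Perm
    (xs.sum :: (pvPairsB xs.length).map (pvWB xs)) := by
  have hN : 1 ≤ (xs.length : Int) := by
    have : xs.length ≠ 0 := fun h => hne (List.length_eq_zero_iff.mp h)
    omega
  -- the only pair of pvPairsA that is NOT a proper window is (0, n): the full peptide
  have hsingle : (pvPairsA xs.length).filter (fun p => !(pvProper xs.length p))
      = [(0, (xs.length : Int))] := by
    apply List.perm_singleton.mp
    rw [List.perm_ext_iff_of_nodup ((pv_nodup_pairsA _).filter _) (by simp)]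
    intro a
    simp only [List.mem_filter, pv_mem_pairsA, List.mem_singleton, pvProper,
      Bool.not_eq_eq_eq_not, Bool.not_true, decide_eq_false_iff_not, not_lt, Prod.ext_iff]
    constructor
    · rintro ⟨⟨h1, h2, h3⟩, h4⟩
      constructor <;> omega
    · rintro ⟨h1, h2⟩
      refine ⟨⟨by omega, by omega, by omega⟩, by omega⟩
  have hA : (pvPairsA xs.length).Perm
      ((0, (xs.length : Int)) :: (pvPairsA xs.length).filter (pvProper xs.length)) := by
    refine ((List.filter_append_perm (pvProper xs.length) (pvPairsA xs.length)).symm).trans ?_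
    rw [hsingle]
    exact List.perm_append_singleton _ _
  -- split B's pairs into contiguous and wrapping windows
  have hB : (pvPairsB xs.length).Perm
      ((pvPairsB xs.length).filter (pvContig xs.length)
        ++ (pvPairsB xs.length).filter (fun p => !(pvContig xs.length p))) :=
    (List.filter_append_perm _ _).symm
  -- contiguous B windows are exactly A's proper windows
  have hc1 : ((pvPairsB xs.length).filter (pvContig xs.length)).map (pvWB xs)
      = (((pvPairsB xs.length).filter (pvContig xs.length)).map
          (fun p => (p.2, p.2 + p.1))).map (pvVA xs) := by
    rw [List.map_map]
    apply List.map_congr_left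
    rintro ⟨L, s⟩ hp
    have hmem := (List.mem_filter.mp hp).1
    have hcg := (List.mem_filter.mp hp).2
    rw [pv_mem_pairsB] at hmem
    obtain ⟨h1, h2, h3, h4⟩ := hmem
    simp only [pvContig, decide_eq_true_eq] at hcg
    simp only at h1 h2 h3 h4 hcg
    unfold pvWB pvVA
    simp only [Function.comp_apply]
    rw [pvP_ext_low xs (s + L) (by omega), pvP_ext_low xs s (by omega)]
  have hc2 : (((pvPairsB xs.length).filter (pvContig xs.length)).map
        (fun p => (p.2, p.2 + p.1))).Perm
      ((pvPairsA xs.length).filter (pvProper xs.length)) := by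
    rw [List.perm_ext_iff_of_nodup
      (((pv_nodup_pairsB _).filter _).map (by
        rintro ⟨a1, a2⟩ ⟨b1, b2⟩ h
        simp only [Prod.ext_iff] at h ⊢
        omega))
      ((pv_nodup_pairsA _).filter _)]
    intro a
    simp only [List.mem_map, List.mem_filter, pv_mem_pairsB, pv_mem_pairsA, pvContig,
      pvProper, decide_eq_true_eq, Prod.ext_iff]
    constructor
    · rintro ⟨⟨L, s⟩, ⟨⟨h1, h2, h3, h4⟩, h5⟩, h6, h7⟩
      simp only at h1 h2 h3 h4 h5 h6 h7
      refine ⟨⟨by omega, by omega, by omega⟩, by omega⟩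
    · rintro ⟨⟨h1, h2, h3⟩, h4⟩
      refine ⟨(a.2 - a.1, a.1), ⟨⟨by omega, by omega, by omega, by omega⟩, by simp <;> omega⟩,
        by simp, by simp <;> omega⟩
  -- wrapping B windows are exactly A's interior complements
  have hw1 : ((pvPairsB xs.length).filter (fun p => !(pvContig xs.length p))).map (pvWB xs)
      = (((pvPairsB xs.length).filter (fun p => !(pvContig xs.length p))).map
          (fun p => (p.2 + p.1 - (xs.length : Int), p.2))).map (pvCA xs) := by
    rw [List.map_map]
    apply List.map_congr_left
    rintro ⟨L, s⟩ hp
    have hmem := (List.mem_filter.mp hp).1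
    have hcg := (List.mem_filter.mp hp).2
    rw [pv_mem_pairsB] at hmem
    obtain ⟨h1, h2, h3, h4⟩ := hmem
    simp only [pvContig, Bool.not_eq_eq_eq_not, Bool.not_true, decide_eq_false_iff_not,
      not_le] at hcg
    simp only at h1 h2 h3 h4 hcg
    unfold pvWB pvCA
    simp only [Function.comp_apply]
    rw [pvP_ext_high xs (s + L) (by omega), pvP_ext_low xs s (by omega)]
    ring
  have hw2 : (((pvPairsB xs.length).filter (fun p => !(pvContig xs.length p))).map
        (fun p => (p.2 + p.1 - (xs.length : Int), p.2))).Perm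
      ((pvPairsA xs.length).filter (pvInterior xs.length)) := by
    rw [List.perm_ext_iff_of_nodup
      (((pv_nodup_pairsB _).filter _).map (by
        rintro ⟨a1, a2⟩ ⟨b1, b2⟩ h
        simp only [Prod.ext_iff] at h ⊢
        omega))
      ((pv_nodup_pairsA _).filter _)]
    intro a
    simp only [List.mem_map, List.mem_filter, pv_mem_pairsB, pv_mem_pairsA, pvContig,
      pvInterior, Bool.not_eq_eq_eq_not, Bool.not_true, decide_eq_false_iff_not, not_le,
      decide_eq_true_eq, Prod.ext_iff]
    constructor
    · rintro ⟨⟨L, s⟩, ⟨⟨h1, h2, h3, h4⟩, h5⟩, h6, h7⟩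
      simp only at h1 h2 h3 h4 h5 h6 h7
      refine ⟨⟨by omega, by omega, by omega⟩, by omega, by omega⟩
    · rintro ⟨⟨h1, h2, h3⟩, h4, h5⟩
      refine ⟨(a.1 + (xs.length : Int) - a.2, a.2), ⟨⟨by omega, by omega, by omega, by omega⟩,
        by simp <;> omega⟩, by simp <;> omega, by simp⟩
  -- assemble
  have hVA0 : pvVA xs (0, (xs.length : Int)) = xs.sum := by
    unfold pvVA
    simp only
    rw [pvP_len, pvP_zero]
    ring
  refine ((List.Perm.map (pvVA xs) hA).append_right _).trans ?_
  rw [List.map_cons, hVA0, List.cons_append]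
  refine List.Perm.cons _ ?_
  refine (List.Perm.append (hc2.map (pvVA xs)).symm (hw2.map (pvCA xs)).symm).trans ?_
  rw [← hc1, ← hw1, ← List.map_append]
  exact (List.Perm.map (pvWB xs) hB).symm

-- ===== VERDICT (by name: the statement is the Claim_ definition above) =====
theorem cyclospectrum_spec : Claim_equal_cyclospectrum := by
  intro peptide _
  unfold Spec_cyclospectrum cyclospectrum cyclospectrum_alt
  by_cases h0 : peptide = []
  · subst h0; decide
  · have hlen : ¬ PySem.List.len peptide = 0 := by simpa using h0
    rw [if_neg hlen]
    rw [PySem.List.sorted_id_eq_sorted_id_iff_perm]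
    refine (pv_specA peptide).trans ?_
    rw [pv_specB]
    exact List.Perm.cons 0 (pv_pairs_perm peptide h0)
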